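-- pv_equiv track=rewrite | github.com/satishjhanwer/assignments | Assignment 1/question1.py | remove_minimum_distinct_elements
-- ===== SOURCE A (Python) =====
-- def remove_minimum_distinct_elements(arr_len, arr):
--     # Empty Array then do early return
--     if arr_len == 0:
--         return 0
--
--     freq = {}
--
--     # Count frequencies - O(n)
--     for num in arr:
--         # increase frequency
--         freq[num] = freq.get(num, 0) + 1
--
--     # Sort frequencies in descending order - O(n log(n))
--     freq_values = sorted(freq.values(), reverse=True)
--
--     total_removed = 0
--     current_size = arr_len
--
--     # Iterate and remove - O(n)
--     for count in freq_values:
--         total_removed += 1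
--         current_size -= count
--
--         if current_size <= arr_len // 2:
--             return total_removed
--
--     return total_removed
-- ===== SOURCE B (Python) =====
-- def remove_minimum_distinct_elements(arr_len, arr):
--     # Empty Array then do early return
--     if arr_len == 0:
--         return 0
--
--     freq = {}
--     for num in arr:
--         freq[num] = freq.get(num, 0) + 1
--
--     # Counting sort of the frequency values (all lie in 1..len(arr)):
--     # bucket them by value and walk the buckets from the largest value down.
--     n = len(arr)
--     buckets = {}
--     for c in freq.values():
--         buckets[c] = buckets.get(c, 0) + 1
--
--     half = arr_len // 2
--     total_removed = 0
--     current_size = arr_len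
--
--     for f in range(n, 0, -1):
--         for _ in range(buckets.get(f, 0)):
--             total_removed += 1
--             current_size -= f
--             if current_size <= half:
--                 return total_removed
--
--     return total_removed
-- ===== Notes on version B (the rewrite author's own statement) =====
-- stated objective: alternative
-- what changed: Replaces the O(d log d) comparison sort of the frequency values with a counting sort: frequencies are bucketed by value and the greedy removal walks the buckets from the largest frequency down, so no sort is performed.
import Mathlib
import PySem

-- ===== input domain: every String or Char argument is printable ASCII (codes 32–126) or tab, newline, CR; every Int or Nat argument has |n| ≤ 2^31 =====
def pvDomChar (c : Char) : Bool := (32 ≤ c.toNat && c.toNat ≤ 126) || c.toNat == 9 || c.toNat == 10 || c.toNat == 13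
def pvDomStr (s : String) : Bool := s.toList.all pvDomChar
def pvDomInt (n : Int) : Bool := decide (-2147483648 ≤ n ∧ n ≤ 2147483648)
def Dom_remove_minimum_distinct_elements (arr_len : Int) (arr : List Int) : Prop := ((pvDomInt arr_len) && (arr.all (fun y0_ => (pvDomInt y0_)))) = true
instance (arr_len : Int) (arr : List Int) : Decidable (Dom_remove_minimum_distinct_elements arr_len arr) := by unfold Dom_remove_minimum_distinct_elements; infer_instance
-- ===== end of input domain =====

-- B replaces A's comparison sort of the frequency values by a counting sort
-- (bucket the frequency values, walk the buckets from the largest value down);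
-- same counting and greedy removal, same return value on every input.

-- ===== PORT A =====
-- the 'for count in freq_values' loop with its early return
def pvLoopA (arr_len : Int) : List Int → Int → Int → Int
  | [], total_removed, _ => total_removed
  | count :: rest, total_removed, current_size =>
    let total_removed := total_removed + 1
    let current_size := current_size - count
    if current_size ≤ PySem.Int.floordiv arr_len 2 then total_removed
    else pvLoopA arr_len rest total_removed current_size

def remove_minimum_distinct_elements (arr_len : Int) (arr : List Int) : Int :=
  if arr_len = 0 then 0
  else
    let freq : PySem.Dict Int Int :=
      arr.foldl (fun d num => d.insert num (d.getD num 0 + 1)) PySem.Dict.empty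
    let freq_values := PySem.List.sorted freq.values (fun x => x) true
    pvLoopA arr_len freq_values 0 arr_len

-- ===== PORT B =====
-- 'for _ in range(buckets.get(f, 0)): …' — Sum.inl means the early return fired
def pvInnerB (f half : Int) : Nat → Int → Int → Int ⊕ (Int × Int)
  | 0, total_removed, current_size => Sum.inr (total_removed, current_size)
  | k + 1, total_removed, current_size =>
    let total_removed := total_removed + 1
    let current_size := current_size - f
    if current_size ≤ half then Sum.inl total_removed
    else pvInnerB f half k total_removed current_size

-- 'for f in range(n, 0, -1): …'
def pvOuterB (buckets : PySem.Dict Int Int) (half : Int) : List Int → Int → Int → Int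
  | [], total_removed, _ => total_removed
  | f :: rest, total_removed, current_size =>
    match pvInnerB f half (buckets.getD f 0).toNat total_removed current_size with
    | Sum.inl ans => ans
    | Sum.inr (total_removed, current_size) => pvOuterB buckets half rest total_removed current_size

def remove_minimum_distinct_elements_alt (arr_len : Int) (arr : List Int) : Int :=
  if arr_len = 0 then 0
  else
    let freq : PySem.Dict Int Int :=
      arr.foldl (fun d num => d.insert num (d.getD num 0 + 1)) PySem.Dict.empty
    let n : Int := arr.length
    let buckets : PySem.Dict Int Int :=
      freq.values.foldl (fun d c => d.insert c (d.getD c 0 + 1)) PySem.Dict.empty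
    pvOuterB buckets (PySem.Int.floordiv arr_len 2) (PySem.List.pyRange n 0 (-1)) 0 arr_len

-- ===== PRECONDITION & SPEC =====
def Spec_remove_minimum_distinct_elements (arr_len : Int) (arr : List Int) (out : Int) : Prop := out = remove_minimum_distinct_elements_alt arr_len arr
instance (arr_len : Int) (arr : List Int) (out : Int) : Decidable (Spec_remove_minimum_distinct_elements arr_len arr out) := by unfold Spec_remove_minimum_distinct_elements; infer_instance

-- ===== CLAIM (what is proved, stated in full; the proofs are below) =====
def Claim_equal_remove_minimum_distinct_elements : Prop := ∀ (arr_len : Int) (arr : List Int), Dom_remove_minimum_distinct_elements arr_len arr → Spec_remove_minimum_distinct_elements arr_len arr (remove_minimum_distinct_elements arr_len arr)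

-- ===== LEMMAS AND PROOFS =====

-- proof-side form of the shared greedy loop, with arr_len // 2 precomputed
def pvGLoop (half : Int) : List Int → Int → Int → Int
  | [], t, _ => t
  | c :: rest, t, s => if s - c ≤ half then t + 1 else pvGLoop half rest (t + 1) (s - c)

theorem pvLoopA_eq_g (al : Int) : ∀ (l : List Int) (t s : Int),
    pvLoopA al l t s = pvGLoop (PySem.Int.floordiv al 2) l t s := by
  intro l
  induction l with
  | nil => intro t s; rfl
  | cons c rest ih =>
    intro t s
    simp only [pvLoopA, pvGLoop]
    split_ifs <;> simp [ih]

theorem pvInnerB_g (half f : Int) (k : Nat) :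
    ∀ (rest : List Int) (t s : Int),
      (match pvInnerB f half k t s with
        | Sum.inl ans => ans
        | Sum.inr (t', s') => pvGLoop half rest t' s') =
      pvGLoop half (List.replicate k f ++ rest) t s := by
  induction k with
  | zero => intro rest t s; rfl
  | succ k ih =>
    intro rest t s
    simp only [pvInnerB, List.replicate_succ, List.cons_append, pvGLoop]
    split_ifs with h
    · rfl
    · exact ih rest (t + 1) (s - f)

theorem pvOuterB_g (buckets : PySem.Dict Int Int) (half : Int) :
    ∀ (fs : List Int) (t s : Int),
      pvOuterB buckets half fs t s =
      pvGLoop half (fs.flatMap (fun f => List.replicate (buckets.getD f 0).toNat f)) t s := by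
  intro fs
  induction fs with
  | nil => intro t s; rfl
  | cons f rest ih =>
    intro t s
    simp only [pvOuterB, List.flatMap_cons]
    rw [← pvInnerB_g half f (buckets.getD f 0).toNat]
    cases hk : pvInnerB f half (buckets.getD f 0).toNat t s with
    | inl ans => rfl
    | inr p => cases p with | mk t' s' => simp [ih]

theorem pvPermFlat : ∀ (m : Nat) (b : Int) (l : List Int), (∀ x ∈ l, b < x ∧ x ≤ b + m) →
    ((PySem.List.pyRange (b + m) b (-1)).flatMap (fun f => List.replicate (l.count f) f)).Perm l := by
  intro m
  induction m with
  | zero =>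
    intro b l h
    rw [PySem.List.pyRange_neg_one_eq_nil (by omega)]
    have : l = [] := by
      cases l with
      | nil => rfl
      | cons x xs => exact absurd (h x (by simp)) (by omega)
    simp [this]
  | succ m ih =>
    intro b l h
    have hab : b < b + (m + 1 : Nat) := by push_cast; omega
    rw [PySem.List.pyRange_neg_one_cons hab]
    simp only [List.flatMap_cons]
    set a : Int := b + (m + 1 : Nat) with ha
    have hblock : List.replicate (l.count a) a = l.filter (· == a) := (List.filter_beq a).symm
    have htail : ((PySem.List.pyRange (a - 1) b (-1)).flatMap (fun f => List.replicate (l.count f) f))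
        = ((PySem.List.pyRange (a - 1) b (-1)).flatMap (fun f => List.replicate ((l.filter (· != a)).count f) f)) := by
      apply List.flatMap_congr
      intro f hf
      have hfa : f ≠ a := by
        have := (PySem.List.mem_pyRange_neg_one).1 hf
        omega
      rw [List.count_filter]
      simp [hfa]
    have ha1 : a - 1 = b + (m : Nat) := by push_cast [ha]; omega
    have htp : ((PySem.List.pyRange (a - 1) b (-1)).flatMap (fun f => List.replicate ((l.filter (· != a)).count f) f)).Perm (l.filter (· != a)) := by
      rw [ha1]
      apply ih
      intro x hx
      have hxl := List.mem_of_mem_filter hx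
      have hxa : x ≠ a := by simpa using (List.of_mem_filter hx)
      have := h x hxl
      push_cast at this ⊢
      omega
    rw [hblock, htail]
    exact (List.Perm.append_left _ htp).trans (by simpa [bne] using List.filter_append_perm (· == a) l)

theorem pvSortedFlat (l : List Int) : ∀ (m : Nat) (b : Int),
    ((PySem.List.pyRange (b + m) b (-1)).flatMap (fun f => List.replicate (l.count f) f)).Pairwise (fun x y => y ≤ x) := by
  intro m
  induction m with
  | zero =>
    intro b
    rw [PySem.List.pyRange_neg_one_eq_nil (by omega)]
    simp
  | succ m ih =>
    intro b
    have hab : b < b + (m + 1 : Nat) := by push_cast; omega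
    rw [PySem.List.pyRange_neg_one_cons hab]
    simp only [List.flatMap_cons]
    rw [List.pairwise_append]
    refine ⟨by simp [List.pairwise_replicate], ?_, ?_⟩
    · have h1 : b + (m + 1 : Nat) - 1 = b + (m : Nat) := by push_cast; omega
      rw [h1]; exact ih b
    · intro x hx y hy
      have hxa := (List.eq_of_mem_replicate hx)
      rcases List.mem_flatMap.1 hy with ⟨f, hf, hyf⟩
      have := (PySem.List.mem_pyRange_neg_one).1 hf
      have := List.eq_of_mem_replicate hyf
      omega

theorem pvFlat_eq_sorted (l : List Int) (m : Nat) (b : Int) (h : ∀ x ∈ l, b < x ∧ x ≤ b + m) :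
    PySem.List.sorted l (fun x => x) true =
    (PySem.List.pyRange (b + m) b (-1)).flatMap (fun f => List.replicate (l.count f) f) := by
  apply List.Perm.eq_of_pairwise (le := fun x y : Int => y ≤ x)
    (fun a b _ _ h1 h2 => by omega)
    (PySem.List.sorted_pairwise_rev l (fun x => x)) (pvSortedFlat l m b)
    ((PySem.List.sorted_perm l (fun x => x) true).trans (pvPermFlat m b l h).symm)

theorem pv_main (arr_len : Int) (arr : List Int) :
    remove_minimum_distinct_elements arr_len arr = remove_minimum_distinct_elements_alt arr_len arr := by
  unfold remove_minimum_distinct_elements remove_minimum_distinct_elements_alt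
  by_cases h0 : arr_len = 0
  · simp [h0]
  · simp only [if_neg h0]
    set freq : PySem.Dict Int Int :=
      arr.foldl (fun d num => d.insert num (d.getD num 0 + 1)) PySem.Dict.empty with hfreq
    set vals := freq.values with hvals
    set buckets : PySem.Dict Int Int :=
      vals.foldl (fun d c => d.insert c (d.getD c 0 + 1)) PySem.Dict.empty with hbuckets
    have hfreqc : freq = PySem.Dict.counter arr := PySem.Dict.foldl_insert_getD_add_one_eq_counter arr
    have hvmap : vals = (PySem.Set.ofList arr).map (fun k => (arr.count k : Int)) := by
      rw [hvals, hfreqc]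
      rw [PySem.Dict.values_eq_map_keys _ (PySem.Dict.nodup_keys_counter arr) 0]
      rw [PySem.Dict.keys_counter]
      congr 1
      funext k
      rw [PySem.Dict.getD_counter]
    have hbound : ∀ x ∈ vals, (0:Int) < x ∧ x ≤ (0:Int) + (arr.length : Nat) := by
      intro x hx
      rw [hvmap] at hx
      rcases List.mem_map.1 hx with ⟨k, hk, rfl⟩
      have hk' : k ∈ arr := (PySem.Set.mem_ofList arr k).1 hk
      have h1 : 0 < arr.count k := List.count_pos_iff.2 hk'
      have h2 : arr.count k ≤ arr.length := List.count_le_length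
      constructor <;> omega
    have hgd : ∀ f : Int, (buckets.getD f 0).toNat = vals.count f := by
      intro f
      rw [hbuckets, PySem.Dict.getD_foldl_insert_add_one]
      simp [PySem.Dict.getD, PySem.Dict.get?, PySem.Dict.empty]
    rw [pvLoopA_eq_g, pvOuterB_g]
    have hflateq : (PySem.List.pyRange ((arr.length : Nat) : Int) 0 (-1)).flatMap
          (fun f => List.replicate (buckets.getD f 0).toNat f)
        = (PySem.List.pyRange ((0:Int) + (arr.length : Nat)) 0 (-1)).flatMap
          (fun f => List.replicate (vals.count f) f) := by
      rw [zero_add]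
      exact List.flatMap_congr (fun f _ => by rw [hgd f])
    rw [hflateq, ← pvFlat_eq_sorted vals arr.length 0 hbound]

-- ===== VERDICT (by name: the statement is the Claim_ definition above) =====
theorem remove_minimum_distinct_elements_spec : Claim_equal_remove_minimum_distinct_elements := by
  intro arr_len arr _
  unfold Spec_remove_minimum_distinct_elements
  exact pv_main arr_len arr
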